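-- pv_equiv track=rewrite | github.com/RomainPastureau/Krajjat | tool_functions.py | get_difference_paths
-- ===== SOURCE A (Python) =====
-- def get_difference_paths(paths):
--     """Returns, for each path, a list of the subfolders that are not common with all the other paths.
--
--     .. versionadded:: 2.0
--
--     Parameters
--     ----------
--     paths: list(str)
--         The list of paths.
--
--     Returns
--     -------
--     list(list(str))
--         A list containing a list for each path, which itself contains the subfolders that are not common with the other
--         paths.
--
--     Example
--     -------
--     >>> path1 = "C:/Sequences/Raw/Subject1/Feb1/Sequence1"
--     >>> path2 = "C:/Sequences/Resampled/Subject1/Mar1/Sequence1"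
--     >>> get_difference_paths([path1, path2])
--     [['Raw', 'Feb1'], ['Original', 'Mar1']]
--     """
--     paths_splitted = []
--     min_len = None
--
--     for path in paths:
--         path_splitted = path.split("/")
--         paths_splitted.append(path_splitted)
--         length_path = len(path_splitted)
--         if min_len is None:
--             min_len = length_path
--         elif min_len > length_path:
--             min_len = length_path
--
--     new_paths = [[] for _ in range(len(paths))]
--
--     if min_len > 1:
--         for i in range(min_len):
--             keep = False
--             for p in range(len(paths_splitted)):
--                 if paths_splitted[p][i] != paths_splitted[0][i]:
--                     keep = True
--             if keep:
--                 for p in range(len(paths_splitted)):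
--                     new_paths[p].append(paths_splitted[p][i])
--
--         for p in range(len(paths_splitted)):
--             if len(paths_splitted[p]) > min_len:
--                 for i in range(min_len, len(paths_splitted[p])):
--                     new_paths[p].append(paths_splitted[p][i])
--
--     else:
--         new_paths = paths_splitted
--
--     return new_paths
-- ===== SOURCE B (Python) =====
-- def _peel(rows):
--     first = rows[0][0]
--     keep = any(r[0] != first for r in rows)
--     tails = [r[1:] for r in rows]
--     if any(len(t) == 0 for t in tails):
--         rest = tails
--     else:
--         rest = _peel(tails)
--     return [([r[0]] if keep else []) + t for r, t in zip(rows, rest)]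
--
--
-- def get_difference_paths(paths):
--     splits = [p.split("/") for p in paths]
--     if splits and all(len(s) > 1 for s in splits):
--         return _peel(splits)
--     return splits
-- ===== Notes on version B (the rewrite author's own statement) =====
-- stated objective: alternative
-- what changed: A computes min_len with a manual scan and then runs index-based nested loops (per-column inner scan comparing to row 0, in-place appends, an explicit tail loop); B recursively peels all split paths in lockstep (head column + tails), deciding each column as it is consumed and appending the leftover tails at the recursion base, with no index arithmetic and no min-length computation.
import Mathlib
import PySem

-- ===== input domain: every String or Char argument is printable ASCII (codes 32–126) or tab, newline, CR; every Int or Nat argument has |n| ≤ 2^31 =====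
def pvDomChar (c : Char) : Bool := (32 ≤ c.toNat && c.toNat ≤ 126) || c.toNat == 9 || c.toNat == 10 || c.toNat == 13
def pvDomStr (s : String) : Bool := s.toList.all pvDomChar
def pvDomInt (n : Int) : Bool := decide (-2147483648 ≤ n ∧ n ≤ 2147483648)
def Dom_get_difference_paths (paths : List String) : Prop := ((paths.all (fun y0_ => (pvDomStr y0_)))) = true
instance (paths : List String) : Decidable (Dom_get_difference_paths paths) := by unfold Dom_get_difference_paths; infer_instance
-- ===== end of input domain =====

-- B replaces A's min-length scan plus index-based column loops by a recursive lockstep head/tail peel of the split paths; objective: alternative (return-value equivalence; neither mutates its argument).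


-- ===== PORT A =====
-- Literal port of A. The accumulator pair is (paths_splitted, min_len); 'path.split("/")' is
-- PySem.Str.split? with the non-empty separator "/" (never none), so '.getD []' is exact.
-- The in-place update loops 'for p in range(len(...)): new_paths[p].append(x_p)' are ported as
-- List.mapIdx over new_paths (each iteration touches exactly row p); indices into splits/rows use
-- pyGetD, exact because every accessed index is in range on Python's control path.
def get_difference_paths (paths : List String) : List (List String) :=
  let st := paths.foldl
    (fun (acc : List (List String) × Option Int) path =>
      let ps := (PySem.Str.split? path "/").getD []
      let splitted := acc.1 ++ [ps]
      match acc.2 with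
      | none => (splitted, some (PySem.List.len ps))
      | some m =>
        if m > PySem.List.len ps then (splitted, some (PySem.List.len ps))
        else (splitted, some m))
    ([], none)
  let splits := st.1
  let new_paths0 : List (List String) := paths.map (fun _ => [])
  match st.2 with
  | none => new_paths0   -- Python: 'None > 1' raises TypeError here (paths = []); excluded by Pre_
  | some min_len =>
    if min_len > 1 then
      let np1 := (PySem.List.pyRange 0 min_len 1).foldl
        (fun np i =>
          let keep := (PySem.List.pyRange 0 (PySem.List.len splits) 1).foldl
            (fun keep p =>
              if PySem.List.pyGetD (PySem.List.pyGetD splits p []) i "" ≠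
                 PySem.List.pyGetD (PySem.List.pyGetD splits 0 []) i "" then true else keep)
            false
          if keep then
            np.mapIdx (fun p row => row ++ [PySem.List.pyGetD (PySem.List.pyGetD splits (p : Int) []) i ""])
          else np)
        new_paths0
      np1.mapIdx (fun p row =>
        let sp := PySem.List.pyGetD splits (p : Int) []
        if PySem.List.len sp > min_len then
          (PySem.List.pyRange min_len (PySem.List.len sp) 1).foldl
            (fun r i => r ++ [PySem.List.pyGetD sp i ""]) row
        else row)
    else splits

-- ===== PORT B =====
-- Port of B's helper _peel: recursive lockstep peel of the rows. rows[0][0] / r[0] are ported as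
-- headD "" — exact because on every call from B every row is nonempty (Python would raise
-- IndexError otherwise); the 'rows = []' guard only makes the recursion total (Python raises there,
-- and B never calls _peel with []).
def pvPeel (rows : List (List String)) : List (List String) :=
  if hrows : rows = [] then []
  else
    -- first = rows[0][0]; keep = any(r[0] != first for r in rows); tails = [r[1:] for r in rows]
    if h : (rows.map List.tail).any List.isEmpty then
      -- rest = tails
      (rows.zip (rows.map List.tail)).map
        (fun rt => (if rows.any (fun r => r.headD "" ≠ (rows.headD []).headD "") then [rt.1.headD ""] else []) ++ rt.2)
    else
      -- rest = _peel(tails)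
      (rows.zip (pvPeel (rows.map List.tail))).map
        (fun rt => (if rows.any (fun r => r.headD "" ≠ (rows.headD []).headD "") then [rt.1.headD ""] else []) ++ rt.2)
termination_by (rows.headD []).length
decreasing_by
  cases rows with
  | nil => exact absurd rfl hrows
  | cons r0 rs =>
    simp only [List.map_cons, List.any_cons, Bool.or_eq_true, not_or, List.isEmpty_iff] at h
    have h0 : r0.tail ≠ [] := h.1
    cases r0 with
    | nil => exact absurd rfl h0
    | cons a t => simp

-- Port of B (Source B): split each path, and if the list is nonempty and every split has more than one
-- component, peel; otherwise return the splits unchanged.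
def get_difference_paths_alt (paths : List String) : List (List String) :=
  let splits := paths.map (fun p => (PySem.Str.split? p "/").getD [])
  if splits ≠ [] ∧ splits.all (fun s => PySem.List.len s > 1) then pvPeel splits
  else splits

-- ===== PRECONDITION & SPEC =====
-- Pre_ excludes only the empty list, on which the Python A raises TypeError ('None > 1').
def Pre_get_difference_paths (paths : List String) : Prop := paths ≠ []
instance (paths : List String) : Decidable (Pre_get_difference_paths paths) := by unfold Pre_get_difference_paths; infer_instance

def pvWitness_get_difference_paths : List String := ["C:/Seq/Raw/S1/Feb1/Seq1", "C:/Seq/Res/S1/Mar1/Seq1"]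

def Spec_get_difference_paths (paths : List String) (out : List (List String)) : Prop := out = get_difference_paths_alt paths
instance (paths : List String) (out : List (List String)) : Decidable (Spec_get_difference_paths paths out) := by unfold Spec_get_difference_paths; infer_instance

-- ===== CLAIM (what is proved, stated in full; the proofs are below) =====
def Claim_equal_get_difference_paths : Prop := ∀ (paths : List String), Dom_get_difference_paths paths → Pre_get_difference_paths paths → Spec_get_difference_paths paths (get_difference_paths paths)


-- ===== LEMMAS AND PROOFS =====

theorem pvFoldIteTrue {α : Type} (P : α → Prop) [DecidablePred P] (l : List α) (b : Bool) :
    l.foldl (fun ok x => if P x then true else ok) b = (b || l.any (fun x => decide (P x))) := by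
  induction l generalizing b with
  | nil => simp
  | cons x t ih =>
    rw [List.foldl_cons, ih]
    by_cases h : P x <;> simp [h]

-- abbreviate split
def pvF (p : String) : List String := (PySem.Str.split? p "/").getD []

-- A's accumulator loop, once min_len is some
theorem pvFoldA (l : List String) (acc : List (List String)) (a : Int) :
    l.foldl (fun (acc : List (List String) × Option Int) path =>
      let ps := (PySem.Str.split? path "/").getD []
      let splitted := acc.1 ++ [ps]
      match acc.2 with
      | none => (splitted, some (PySem.List.len ps))
      | some m =>
        if m > PySem.List.len ps then (splitted, some (PySem.List.len ps))
        else (splitted, some m)) (acc, some a)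
    = (acc ++ l.map pvF, some (l.foldl (fun m q => min m (PySem.List.len (pvF q))) a)) := by
  induction l generalizing acc a with
  | nil => simp
  | cons x t ih =>
    rw [List.foldl_cons, List.foldl_cons]
    show t.foldl _ (if a > PySem.List.len (pvF x) then (acc ++ [pvF x], some (PySem.List.len (pvF x))) else (acc ++ [pvF x], some a)) = _
    split_ifs with h
    · have h2 : min a (PySem.List.len (pvF x)) = PySem.List.len (pvF x) := by
        simp only [PySem.List.len_eq] at h ⊢; omega
      rw [ih, h2]; simp
    · have h2 : min a (PySem.List.len (pvF x)) = a := by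
        simp only [PySem.List.len_eq] at h ⊢; omega
      rw [ih, h2]; simp

theorem pvFoldA0 (p0 : String) (rest : List String) :
    (p0 :: rest).foldl (fun (acc : List (List String) × Option Int) path =>
      let ps := (PySem.Str.split? path "/").getD []
      let splitted := acc.1 ++ [ps]
      match acc.2 with
      | none => (splitted, some (PySem.List.len ps))
      | some m =>
        if m > PySem.List.len ps then (splitted, some (PySem.List.len ps))
        else (splitted, some m)) ([], none)
    = ((p0 :: rest).map pvF,
       some (rest.foldl (fun m q => min m (PySem.List.len (pvF q))) (PySem.List.len (pvF p0)))) := by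
  rw [List.foldl_cons]
  show rest.foldl _ ([pvF p0], some (PySem.List.len (pvF p0))) = _
  rw [pvFoldA]
  simp

-- the column loop of A: appending column k to every row, for kept columns
theorem pvFoldCols (splits : List (List String)) (g : Nat → Bool)
    (K : List Nat) (np : List (List String)) :
    K.foldl (fun np k => if g k then
        np.mapIdx (fun p row => row ++ [(splits.getD p []).getD k ""])
      else np) np
    = np.mapIdx (fun p row => row ++ (K.filter g).map (fun k => (splits.getD p []).getD k "")) := by
  induction K generalizing np with
  | nil => simp; exact (List.ext_getElem (by simp) (by simp)).symm
  | cons k K ih =>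
    rw [List.foldl_cons]
    by_cases hk : g k
    · rw [if_pos hk, ih, List.mapIdx_mapIdx]
      simp [hk, Function.comp_def]
    · rw [if_neg hk, ih]
      simp [hk]

-- row r's output: the kept columns of the common region (length m), then the tail beyond it
def pvRow (m : Nat) (g : Nat → Bool) (row : List String) : List String :=
  ((List.range m).filter g).map (fun k => row.getD k "") ++ row.drop m

-- column k is kept: some row differs from row 0 there
def pvG (splits : List (List String)) (k : Nat) : Bool :=
  splits.any (fun row => decide (row.getD k "" ≠ (splits.getD 0 []).getD k ""))

theorem pvAbranch (splits : List (List String)) (M : Int) (hM : 1 < M) :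
    ((PySem.List.pyRange 0 M 1).foldl
      (fun np i =>
        let keep := (PySem.List.pyRange 0 (PySem.List.len splits) 1).foldl
          (fun keep p =>
            if PySem.List.pyGetD (PySem.List.pyGetD splits p []) i "" ≠
               PySem.List.pyGetD (PySem.List.pyGetD splits 0 []) i "" then true else keep) false
        if keep then
          np.mapIdx (fun p row => row ++ [PySem.List.pyGetD (PySem.List.pyGetD splits (p : Int) []) i ""])
        else np)
      (splits.map (fun _ => []))).mapIdx (fun p row =>
        let sp := PySem.List.pyGetD splits (p : Int) []
        if PySem.List.len sp > M then
          (PySem.List.pyRange M (PySem.List.len sp) 1).foldl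
            (fun r i => r ++ [PySem.List.pyGetD sp i ""]) row
        else row)
    = splits.map (pvRow M.toNat (pvG splits)) := by
  have hM0 : M = ((M.toNat : Nat) : Int) := (Int.toNat_of_nonneg (by omega)).symm
  rw [hM0, PySem.List.pyRange_zero_nat, List.foldl_map]
  simp only [pvFoldIteTrue, Bool.false_or, PySem.List.pyGetD_natCast]
  have hkeep : ∀ (k : Nat),
      ((PySem.List.pyRange 0 (PySem.List.len splits)).any fun x =>
        decide ((PySem.List.pyGetD splits x []).getD k "" ≠ (PySem.List.pyGetD splits 0 []).getD k ""))
      = pvG splits k := by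
    intro k
    have h1 : (fun (x : Int) => decide ((PySem.List.pyGetD splits x []).getD k "" ≠ (PySem.List.pyGetD splits 0 []).getD k ""))
        = ((fun v : List String => decide (v.getD k "" ≠ (PySem.List.pyGetD splits 0 []).getD k "")) ∘ (fun j => PySem.List.pyGetD splits j [])) := rfl
    rw [h1, ← List.any_map, PySem.List.map_pyGetD_pyRange_zero]
    simp only [pvG, PySem.List.pyGetD_zero]
  simp only [hkeep]
  rw [pvFoldCols splits (pvG splits), List.mapIdx_mapIdx]
  apply List.ext_getElem
  · simp
  · intro p hp hp2
    simp only [List.getElem_mapIdx, List.getElem_map, Function.comp_apply]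
    have hplen : p < splits.length := by simpa using hp2
    have hget : splits.getD p [] = splits[p]'hplen := List.getD_eq_getElem _ _ hplen
    rw [hget]
    rw [PySem.List.foldl_pyRange_pyGetD (splits[p]'hplen) "" (fun r v => r ++ [v]) _
      (by simp : (0:Int) ≤ ((M.toNat : Nat) : Int))]
    simp only [PySem.List.foldl_append_singleton_eq_self, Int.toNat_natCast, List.nil_append, pvRow]
    split_ifs with h
    · rfl
    · rw [List.drop_eq_nil_of_le (by simp only [PySem.List.len_eq] at h; omega), List.append_nil]

-- ==== B side ====

-- facts about foldl min
theorem pvFoldMinGt (l : List Nat) (a c : Nat) :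
    (c < l.foldl (fun m q => min m q) a) ↔ (c < a ∧ ∀ x ∈ l, c < x) := by
  induction l generalizing a with
  | nil => simp
  | cons x t ih =>
    rw [List.foldl_cons, ih]
    constructor
    · rintro ⟨h1, h2⟩
      refine ⟨by omega, fun y hy => ?_⟩
      rcases List.mem_cons.mp hy with h | h
      · subst h; omega
      · exact h2 y h
    · rintro ⟨h1, h2⟩
      have hx := h2 x (by simp)
      exact ⟨by omega, fun y hy => h2 y (List.mem_cons_of_mem _ hy)⟩

theorem pvFoldMinLe (l : List Nat) (a : Nat) :
    l.foldl (fun m q => min m q) a ≤ a ∧ ∀ x ∈ l, l.foldl (fun m q => min m q) a ≤ x := by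
  induction l generalizing a with
  | nil => simp
  | cons x t ih =>
    rw [List.foldl_cons]
    rcases ih (min a x) with ⟨h1, h2⟩
    refine ⟨by omega, fun y hy => ?_⟩
    rcases List.mem_cons.mp hy with h | h
    · subst h; omega
    · exact h2 y h

theorem pvFoldMinMem (l : List Nat) (a : Nat) :
    l.foldl (fun m q => min m q) a = a ∨ l.foldl (fun m q => min m q) a ∈ l := by
  induction l generalizing a with
  | nil => simp
  | cons x t ih =>
    rw [List.foldl_cons]
    rcases ih (min a x) with h | h
    · rcases Nat.le_total a x with hle | hle
      · left; omega
      · right; rw [h]; simp; left; omega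
    · right; exact List.mem_cons_of_mem _ h

-- min length of rows = r0 :: rs (as A computes it)
def pvMinLen : List (List String) → Nat
  | [] => 0
  | r0 :: rs => (rs.map List.length).foldl (fun m q => min m q) r0.length

theorem pvGetD_zero_headD (r : List String) : r.getD 0 "" = r.headD "" := by
  cases r <;> rfl

theorem pvGetD_succ_tail (r : List String) (k : Nat) : r.getD (k+1) "" = r.tail.getD k "" := by
  cases r <;> simp [List.getD]

-- shifting pvG through the lockstep tail step
theorem pvG_tail (rows : List (List String)) :
    pvG (rows.map List.tail) = fun k => pvG rows (k+1) := by
  funext k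
  unfold pvG
  rw [List.any_map]
  have h0 : (rows.map List.tail).getD 0 [] = (rows.getD 0 []).tail := by
    cases rows <;> simp [List.getD]
  rw [h0]
  refine List.any_congr rfl (fun r => ?_)
  simp only [Function.comp_apply, pvGetD_succ_tail]

theorem pvRow_succ (m : Nat) (g : Nat → Bool) (r : List String) :
    pvRow (m+1) g r = (if g 0 then [r.getD 0 ""] else []) ++ pvRow m (fun k => g (k+1)) r.tail := by
  have hdrop : r.drop (m+1) = r.tail.drop m := by cases r <;> simp
  unfold pvRow
  rw [List.range_succ_eq_map, List.filter_cons, hdrop]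
  by_cases hg : g 0
  · rw [if_pos hg, List.map_cons, List.filter_map]
    simp only [List.map_map, Function.comp_def, Nat.succ_eq_add_one, pvGetD_succ_tail, hg,
      if_true, List.cons_append, List.nil_append]
  · rw [if_neg (by simpa using hg), List.filter_map]
    simp only [List.map_map, Function.comp_def, Nat.succ_eq_add_one, pvGetD_succ_tail, hg,
      Bool.false_eq_true, if_false, List.nil_append]
theorem pvZipMap (rows : List (List String)) (f : List String → List String) (keep : Bool) :
    (rows.zip (rows.map f)).map (fun rt => (if keep then [rt.1.headD ""] else []) ++ rt.2)
    = rows.map (fun r => (if keep then [r.headD ""] else []) ++ f r) := by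
  induction rows with
  | nil => rfl
  | cons r rs ih => simp only [List.map_cons, List.zip_cons_cons, ih]

-- keep at the head column is pvG at 0
theorem pvKeepHead (rows : List (List String)) :
    (rows.any (fun r => r.headD "" ≠ (rows.headD []).headD "")) = pvG rows 0 := by
  unfold pvG
  have h0 : rows.getD 0 [] = rows.headD [] := by cases rows <;> rfl
  rw [h0]
  refine List.any_congr rfl (fun r => ?_)
  simp only [pvGetD_zero_headD]

-- the peel recursion computes pvRow over the min length
theorem pvPeel_eq (n : Nat) : ∀ rows : List (List String), rows ≠ [] → (∀ r ∈ rows, r ≠ []) →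
    pvMinLen rows = n + 1 → pvPeel rows = rows.map (pvRow (n+1) (pvG rows)) := by
  induction n with
  | zero =>
    intro rows hne hall hmin
    obtain ⟨r0, rs, rfl⟩ : ∃ r0 rs, rows = r0 :: rs := by
      cases rows with
      | nil => exact absurd rfl hne
      | cons a t => exact ⟨a, t, rfl⟩
    have hmin' : (rs.map List.length).foldl (fun m q => min m q) r0.length = 1 := hmin
    have hempty : ((r0 :: rs).map List.tail).any List.isEmpty = true := by
      rcases pvFoldMinMem (rs.map List.length) r0.length with h | h
      · have h1 : r0.length = 1 := by omega
        rw [List.any_eq_true]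
        refine ⟨r0.tail, by simp, ?_⟩
        cases r0 with
        | nil => simp at h1
        | cons a t => simp at h1 ⊢; simpa using h1
      · rw [hmin'] at h
        rcases List.mem_map.mp h with ⟨r, hr, hlen⟩
        rw [List.any_eq_true]
        refine ⟨r.tail, List.mem_map.mpr ⟨r, List.mem_cons_of_mem _ hr, rfl⟩, ?_⟩
        cases r with
        | nil => simp
        | cons a t => simp at hlen ⊢; simpa using hlen
    rw [pvPeel.eq_def]
    simp only [dif_neg (by simp : (r0 :: rs : List (List String)) ≠ []), hempty, dite_true]
    rw [pvKeepHead, pvZipMap]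
    refine List.map_congr_left (fun r _ => ?_)
    rw [pvRow_succ]
    simp [pvRow, List.head?_eq_getElem?]
  | succ n ih =>
    intro rows hne hall hmin
    obtain ⟨r0, rs, rfl⟩ : ∃ r0 rs, rows = r0 :: rs := by
      cases rows with
      | nil => exact absurd rfl hne
      | cons a t => exact ⟨a, t, rfl⟩
    have hmin' : (rs.map List.length).foldl (fun m q => min m q) r0.length = n + 2 := hmin
    have hge2 : ∀ r ∈ (r0 :: rs : List (List String)), 1 < r.length := by
      intro r hr
      rcases pvFoldMinLe (rs.map List.length) r0.length with ⟨h1, h2⟩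
      rcases List.mem_cons.mp hr with h | h
      · subst h; omega
      · have := h2 r.length (List.mem_map.mpr ⟨r, h, rfl⟩); omega
    have hnoempty : ((r0 :: rs).map List.tail).any List.isEmpty = false := by
      rw [Bool.eq_false_iff]
      intro hcon
      rw [List.any_eq_true] at hcon
      rcases hcon with ⟨t, ht, hte⟩
      rcases List.mem_map.mp ht with ⟨r, hr, rfl⟩
      have hlr := hge2 r hr
      rw [List.isEmpty_iff] at hte
      have hl0 : r.tail.length = 0 := by rw [hte]; rfl
      simp at hl0; omega
    have hfoldtail : ∀ (l : List (List String)) (a : Nat), (∀ r ∈ l, r ≠ []) → 1 ≤ a →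
        (l.map List.tail).foldl (fun m q => min m q.length) (a - 1)
        = l.foldl (fun m q => min m q.length) a - 1 := by
      intro l
      induction l with
      | nil => intro a _ _; simp
      | cons x t iht =>
        intro a hne1 ha
        rw [List.map_cons, List.foldl_cons, List.foldl_cons]
        have hx : x ≠ [] := hne1 x (by simp)
        have hxl : 1 ≤ x.length := List.length_pos_of_ne_nil hx
        have hxt : x.tail.length = x.length - 1 := by
          cases x with
          | nil => exact absurd rfl hx
          | cons a t => simp
        rw [hxt, show min (a-1) (x.length - 1) = min a x.length - 1 by omega]
        exact iht (min a x.length) (fun r hr => hne1 r (List.mem_cons_of_mem _ hr)) (by omega)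
    have htailmin : pvMinLen ((r0 :: rs).map List.tail) = n + 1 := by
      show ((rs.map List.tail).map List.length).foldl (fun m q => min m q) r0.tail.length = n + 1
      have hr0 : 1 ≤ r0.length := by have := hge2 r0 (by simp); omega
      have hr0t : r0.tail.length = r0.length - 1 := by
        cases r0 with
        | nil => simp at hr0
        | cons a t => simp
      have heq := hfoldtail rs r0.length (fun r hr => by
        have := hge2 r (List.mem_cons_of_mem _ hr); exact List.ne_nil_of_length_pos (by omega)) hr0
      rw [List.foldl_map] at heq
      rw [List.foldl_map, List.foldl_map, hr0t, heq]
      rw [List.foldl_map] at hmin'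
      omega
    have htailne : ((r0 :: rs).map List.tail) ≠ [] := by simp
    have htailall : ∀ t ∈ (r0 :: rs).map List.tail, t ≠ [] := by
      intro t ht
      rcases List.mem_map.mp ht with ⟨r, hr, rfl⟩
      intro hcon
      rw [Bool.eq_false_iff] at hnoempty
      exact hnoempty (List.any_eq_true.mpr ⟨r.tail, List.mem_map.mpr ⟨r, hr, rfl⟩, by simp [hcon]⟩)
    rw [pvPeel.eq_def]
    simp only [dif_neg (by simp : (r0 :: rs : List (List String)) ≠ []), hnoempty]
    simp only [Bool.false_eq_true, dite_false]
    rw [ih ((r0 :: rs).map List.tail) htailne htailall htailmin, pvG_tail, pvKeepHead]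
    rw [List.map_map, pvZipMap]
    refine List.map_congr_left (fun r _ => ?_)
    rw [pvRow_succ]
    simp [List.head?_eq_getElem?]

-- A's Int min fold is the Nat min fold, cast
theorem pvFoldMinCast (l : List String) (a : Nat) :
    l.foldl (fun m q => min m (PySem.List.len (pvF q))) ((a : Nat) : Int)
    = (((l.map (fun q => (pvF q).length)).foldl (fun m q => min m q) a : Nat) : Int) := by
  induction l generalizing a with
  | nil => simp
  | cons x t ih =>
    rw [List.foldl_cons, List.map_cons, List.foldl_cons]
    have hmin : min ((a : Nat) : Int) (PySem.List.len (pvF x)) = (((min a (pvF x).length : Nat)) : Int) := by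
      simp only [PySem.List.len_eq]; omega
    rw [hmin, ih]

-- ===== VERDICT (by name: the statement is the Claim_ definition above) =====
theorem get_difference_paths_spec : Claim_equal_get_difference_paths := by
  intro paths _ hpre
  unfold Spec_get_difference_paths
  obtain ⟨p0, rest, rfl⟩ : ∃ p0 rest, paths = p0 :: rest := by
    cases paths with
    | nil => exact absurd rfl hpre
    | cons a t => exact ⟨a, t, rfl⟩
  simp only [get_difference_paths, get_difference_paths_alt]
  rw [pvFoldA0]
  rw [show (fun p : String => (PySem.Str.split? p "/").getD []) = pvF from rfl]
  set splits := (p0 :: rest).map pvF with hsplits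
  have hMeq : rest.foldl (fun m q => min m (PySem.List.len (pvF q))) (PySem.List.len (pvF p0))
      = ((pvMinLen splits : Nat) : Int) := by
    have h1 : PySem.List.len (pvF p0) = (((pvF p0).length : Nat) : Int) := by
      simp [PySem.List.len_eq]
    rw [h1, pvFoldMinCast]
    have h2 : pvMinLen splits
        = (rest.map (fun q => (pvF q).length)).foldl (fun m q => min m q) (pvF p0).length := by
      show ((rest.map pvF).map List.length).foldl (fun m q => min m q) (pvF p0).length = _
      rw [List.map_map]; rfl
    rw [h2]
  rw [hMeq]
  have hiff : (1 : Int) < ((pvMinLen splits : Nat) : Int)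
      ↔ (splits ≠ [] ∧ splits.all (fun s => decide (PySem.List.len s > 1)) = true) := by
    have hgt : 1 < pvMinLen splits ↔ ∀ s ∈ splits, 1 < s.length := by
      show 1 < pvMinLen ((pvF p0) :: rest.map pvF) ↔ _
      rw [show pvMinLen ((pvF p0) :: rest.map pvF)
          = ((rest.map pvF).map List.length).foldl (fun m q => min m q) (pvF p0).length from rfl]
      rw [pvFoldMinGt]
      constructor
      · rintro ⟨ha, hb⟩ s hs
        rcases List.mem_cons.mp hs with h | h
        · subst h; exact ha
        · exact hb s.length (List.mem_map.mpr ⟨s, h, rfl⟩)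
      · intro h
        refine ⟨h _ (by rw [hsplits]; simp), fun x hx => ?_⟩
        rcases List.mem_map.mp hx with ⟨s, hs, rfl⟩
        exact h s (List.mem_cons_of_mem _ hs)
    constructor
    · intro h
      refine ⟨by rw [hsplits]; simp, ?_⟩
      rw [List.all_eq_true]
      intro s hs
      have := (hgt.mp (by omega)) s hs
      simp [PySem.List.len_eq]; omega
    · rintro ⟨_, hall⟩
      rw [List.all_eq_true] at hall
      have : ∀ s ∈ splits, 1 < s.length := by
        intro s hs
        have := hall s hs
        simp [PySem.List.len_eq] at this
        omega
      have := hgt.mpr this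
      omega
  by_cases hM : (1 : Int) < ((pvMinLen splits : Nat) : Int)
  · simp only [if_pos hM, if_pos (hiff.mp hM)]
    have hmap0 : (p0 :: rest).map (fun _ => ([] : List String)) = splits.map (fun _ => []) := by
      rw [hsplits, List.map_map]; rfl
    rw [hmap0, pvAbranch splits _ hM]
    have hall : ∀ r ∈ splits, r ≠ [] := by
      intro r hr
      have h1 := (hiff.mp hM).2
      rw [List.all_eq_true] at h1
      have := h1 r hr
      simp [PySem.List.len_eq] at this
      exact List.ne_nil_of_length_pos (by omega)
    have h2 : 2 ≤ pvMinLen splits := by omega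
    rw [pvPeel_eq (pvMinLen splits - 1) splits (by rw [hsplits]; simp) hall (by omega)]
    have h3 : ((pvMinLen splits : Nat) : Int).toNat = pvMinLen splits - 1 + 1 := by omega
    rw [h3]
  · simp only [if_neg hM, if_neg (fun hc => hM (hiff.mpr hc))]
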